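-- pv_equiv track=rewrite | github.com/pollinnshh/EGE | 24-01-25 (15)/task-15-18489.py | f
-- ===== SOURCE A (Python) =====
-- def f(a):
--     for x in range(1,1000):
--         u1 = x % 10 == 5
--         u2 = x % 10 == 4
--         f = ((not u1) and u2) <= (x > a - 11)
--         if not f:
--             return False
--     return True
-- ===== SOURCE B (Python) =====
-- def f(a):
--     # Closed form: the loop fails exactly when some x in 1..999 has x % 10 == 4
--     # and x <= a - 11; the smallest such x is 4, so it fails iff a >= 15.
--     return a < 15
-- ===== Notes on version B (the rewrite author's own statement) =====
-- stated objective: simpler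
-- what changed: Replaced the fixed 999-iteration loop checking a boolean implication per x by the closed-form test a < 15, since the loop fails exactly when some x with x % 10 == 4 satisfies x <= a - 11 and the smallest such x is 4.
import Mathlib
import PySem

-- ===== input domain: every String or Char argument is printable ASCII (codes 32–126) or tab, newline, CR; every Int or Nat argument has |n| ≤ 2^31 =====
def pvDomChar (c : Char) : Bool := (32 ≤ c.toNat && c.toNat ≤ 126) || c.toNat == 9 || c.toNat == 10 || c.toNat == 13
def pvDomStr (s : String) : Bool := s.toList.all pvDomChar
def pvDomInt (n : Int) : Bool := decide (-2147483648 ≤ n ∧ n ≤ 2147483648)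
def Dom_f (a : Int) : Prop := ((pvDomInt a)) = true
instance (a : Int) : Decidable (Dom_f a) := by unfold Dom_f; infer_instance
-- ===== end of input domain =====

-- ===== PORT A =====
-- loop body of A: returns false as soon as the per-x boolean f is false
def fLoop (a : Int) : List Int → Bool
  | [] => true
  | x :: rest =>
    let u1 : Bool := PySem.Int.mod x 10 == 5
    let u2 : Bool := PySem.Int.mod x 10 == 4
    let fb : Bool := !(!u1 && u2) || decide (x > a - 11)   -- Python bool-≤ is implication
    if !fb then false else fLoop a rest

def f (a : Int) : Bool := fLoop a (PySem.List.pyRange 1 1000 1)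

-- ===== PORT B =====
def f_alt (a : Int) : Bool := decide (a < 15)

-- ===== PRECONDITION & SPEC =====
def Spec_f (a : Int) (out : Bool) : Prop := out = f_alt a
instance (a : Int) (out : Bool) : Decidable (Spec_f a out) := by unfold Spec_f; infer_instance

-- ===== CLAIM (what is proved, stated in full; the proofs are below) =====
def Claim_equal_f : Prop := ∀ (a : Int), Dom_f a → Spec_f a (f a)

-- ===== LEMMAS AND PROOFS =====

-- When a < 15, every x ≥ 1 passes the per-iteration check, so the loop runs to the end.
theorem fLoop_true_of_lt (a : Int) (h : a < 15) :
    ∀ l : List Int, (∀ x ∈ l, 1 ≤ x) → fLoop a l = true := by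
  intro l
  induction l with
  | nil => intro _; rfl
  | cons x rest ih =>
    intro hx
    have hx1 : 1 ≤ x := hx x (by simp)
    have hrest : ∀ y ∈ rest, 1 ≤ y := fun y hy => hx y (by simp [hy])
    have hfb : (!(!(PySem.Int.mod x 10 == 5) && (PySem.Int.mod x 10 == 4)) || decide (x > a - 11)) = true := by
      by_cases hgt : x > a - 11
      · simp [hgt]
      · -- then x ≤ a - 11 < 4, so 1 ≤ x ≤ 3 and x % 10 = x ≠ 4
        rw [show PySem.Int.mod x 10 = x from by
          rw [PySem.Int.mod_eq_emod_of_pos (by omega)]; omega]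
        simp
        omega
    have step : fLoop a (x :: rest) = fLoop a rest := by
      simp only [fLoop, hfb]
      simp
    rw [step]
    exact ih hrest

-- When a ≥ 15, the loop fails at x = 4 (the first four elements of the range are 1,2,3,4).
theorem fLoop_false_of_ge (a : Int) (h : 15 ≤ a) : f a = false := by
  unfold f
  rw [PySem.List.pyRange_one_cons (by norm_num),
      PySem.List.pyRange_one_cons (by norm_num),
      PySem.List.pyRange_one_cons (by norm_num),
      PySem.List.pyRange_one_cons (by norm_num)]
  simp only [fLoop]
  norm_num [PySem.Int.mod]
  have h4 : Int.fmod (4 : Int) 10 = 4 := by decide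
  simp [h4]
  intro hlt
  exact absurd hlt (by omega)

-- ===== VERDICT (by name: the statement is the Claim_ definition above) =====
theorem f_spec : Claim_equal_f := by
  intro a _
  unfold Spec_f f_alt
  by_cases h : a < 15
  · unfold f
    rw [fLoop_true_of_lt a h _ (fun x hx => (PySem.List.mem_pyRange_one.mp hx).1)]
    simp [h]
  · rw [fLoop_false_of_ge a (by omega)]
    simp [h]
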